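-- pv_equiv track=rewrite | github.com/alejandECE/ml-examples | records generators/stanford_dogs_localization_tfrecords_generator.py | create_records_lists
-- ===== SOURCE A (Python) =====
-- def create_records_lists(filenames: list, jobs: int, load: int):
--   # Assigns number of records per job
--   records_count = len(filenames) if load is None or load > len(filenames) else load
--   records_per_job = [records_count // jobs] * jobs
--   for i in range(records_count % jobs):
--     records_per_job[i] += 1
--   # Create lists of records (one list per job)
--   records_lists = []
--   start = 0
--   for count in records_per_job:
--     # Creates a sublist of records for the current job
--     records_lists.append([record for record in filenames[start: start + count]])
--     start += count
--   return records_lists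
-- ===== SOURCE B (Python) =====
-- def create_records_lists(filenames: list, jobs: int, load: int):
--   n = len(filenames)
--   records_count = n if load is None or load > n else load
--   q, r = divmod(records_count, jobs)
--   return [filenames[i * q + min(i, r): (i + 1) * q + min(i + 1, r)]
--           for i in range(jobs)]
-- ===== Notes on version B (the rewrite author's own statement) =====
-- stated objective: simpler
-- what changed: Replaced the two-phase count-array + running-start accumulator with a single comprehension computing each job's slice bounds in closed form via divmod: start = i*q + min(i, r), end = (i+1)*q + min(i+1, r).
import Mathlib
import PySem

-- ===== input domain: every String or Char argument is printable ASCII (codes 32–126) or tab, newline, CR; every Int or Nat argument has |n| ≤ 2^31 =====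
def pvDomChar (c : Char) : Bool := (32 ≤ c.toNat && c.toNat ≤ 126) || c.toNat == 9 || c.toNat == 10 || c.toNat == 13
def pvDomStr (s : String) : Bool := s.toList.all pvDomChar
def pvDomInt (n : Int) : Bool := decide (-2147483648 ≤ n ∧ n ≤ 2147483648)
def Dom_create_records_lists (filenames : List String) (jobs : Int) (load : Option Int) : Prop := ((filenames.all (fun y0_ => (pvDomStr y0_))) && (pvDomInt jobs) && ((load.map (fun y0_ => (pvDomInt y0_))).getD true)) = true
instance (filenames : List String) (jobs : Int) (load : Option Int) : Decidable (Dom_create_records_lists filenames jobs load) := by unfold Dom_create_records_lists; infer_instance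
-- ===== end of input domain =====

-- ===== PORT A =====
-- One honest line: B replaces A's count array + running-start accumulator with closed-form
-- per-job slice bounds (start = i*q + min(i,r)) computed from one divmod (objective: simpler).

-- Python: `records_per_job[i] += 1`; exact here since the reached indices satisfy
-- 0 ≤ i < len (i ranges over range(records_count % jobs) with i < jobs = len).
def pvIncAt (l : List Int) (i : Int) : List Int :=
  l.set i.toNat (l.getD i.toNat 0 + 1)

def create_records_lists (filenames : List String) (jobs : Int) (load : Option Int) : List (List String) :=
  -- records_count = len(filenames) if load is None or load > len(filenames) else load
  let records_count : Int :=
    match load with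
    | none => (filenames.length : Int)
    | some l => if l > (filenames.length : Int) then (filenames.length : Int) else l
  -- records_per_job = [records_count // jobs] * jobs  (Python: negative multiplier gives [])
  let records_per_job0 : List Int :=
    List.replicate jobs.toNat (PySem.Int.floordiv records_count jobs)
  -- for i in range(records_count % jobs): records_per_job[i] += 1
  let records_per_job : List Int :=
    (PySem.List.pyRange 0 (PySem.Int.mod records_count jobs)).foldl pvIncAt records_per_job0
  -- records_lists = []; start = 0; for count in records_per_job: append slice; start += count
  let st := records_per_job.foldl
    (fun (st : List (List String) × Int) count =>
      (st.1 ++ [(PySem.List.slice filenames (some st.2) (some (st.2 + count))).map (fun record => record)],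
       st.2 + count))
    ([], 0)
  st.1

-- ===== PORT B =====
def create_records_lists_alt (filenames : List String) (jobs : Int) (load : Option Int) : List (List String) :=
  let n : Int := (filenames.length : Int)
  let records_count : Int :=
    match load with
    | none => n
    | some l => if l > n then n else l
  let q : Int := PySem.Int.floordiv records_count jobs
  let r : Int := PySem.Int.mod records_count jobs
  (PySem.List.pyRange 0 jobs).map (fun i =>
    PySem.List.slice filenames (some (i * q + min i r)) (some ((i + 1) * q + min (i + 1) r)))

-- ===== PRECONDITION & SPEC =====
-- Pre_ excludes exactly jobs = 0, where Python A raises ZeroDivisionError (B raises there too).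
def Pre_create_records_lists (filenames : List String) (jobs : Int) (load : Option Int) : Prop :=
  jobs ≠ 0
instance (filenames : List String) (jobs : Int) (load : Option Int) : Decidable (Pre_create_records_lists filenames jobs load) := by unfold Pre_create_records_lists; infer_instance

def pvWitness_create_records_lists : List String × Int × Option Int :=
  (["a", "b", "c"], 2, none)

def Spec_create_records_lists (filenames : List String) (jobs : Int) (load : Option Int) (out : List (List String)) : Prop := out = create_records_lists_alt filenames jobs load
instance (filenames : List String) (jobs : Int) (load : Option Int) (out : List (List String)) : Decidable (Spec_create_records_lists filenames jobs load out) := by unfold Spec_create_records_lists; infer_instance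

-- ===== CLAIM (what is proved, stated in full; the proofs are below) =====
def Claim_equal_create_records_lists : Prop := ∀ (filenames : List String) (jobs : Int) (load : Option Int), Dom_create_records_lists filenames jobs load → Pre_create_records_lists filenames jobs load → Spec_create_records_lists filenames jobs load (create_records_lists filenames jobs load)

-- ===== LEMMAS AND PROOFS =====

-- After m set-increments at indices 0..m-1, entry k of the count array is q+1 for k < m and q for k ≥ m.
theorem pv_perJob_eq (j m : Nat) (q : Int) :
    m ≤ j →
    ((List.range m).map (fun (k : Nat) => (k : Int))).foldl pvIncAt (List.replicate j q)
      = (List.range j).map (fun (k : Nat) => q + if (k : Int) < (m : Int) then 1 else 0) := by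
  induction m with
  | zero =>
    intro _
    apply List.ext_getElem (by simp)
    intro k hk hk'
    simp only [List.range_zero, List.map_nil, List.foldl_nil, List.getElem_replicate,
      List.getElem_map, List.getElem_range]
    simp
  | succ m ih =>
    intro hmj
    have hmj' : m ≤ j := by omega
    rw [List.range_succ, List.map_append, List.foldl_append, ih hmj']
    simp only [List.map_cons, List.map_nil, List.foldl_cons, List.foldl_nil]
    unfold pvIncAt
    apply List.ext_getElem (by simp)
    intro k hk hk'
    have hmltj : m < j := by omega
    have hget : (((List.range j).map (fun (k : Nat) => q + if (k : Int) < (m : Int) then 1 else 0)).getD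
        ((m : Int)).toNat 0) = q := by
      rw [Int.toNat_natCast, List.getD_eq_getElem _ _ (by simpa using hmltj)]
      simp
    simp only [hget]
    simp only [Int.toNat_natCast, List.getElem_set, List.getElem_map, List.getElem_range] at hk ⊢
    by_cases hkm : m = k
    · subst hkm
      have h2 : (m : Int) < (m : Int) + 1 := by omega
      push_cast
      simp [h2]
    · simp only [if_neg hkm]
      by_cases h1 : (k : Int) < (m : Int)
      · have h2 : (k : Int) < (m : Int) + 1 := by omega
        push_cast at h1 h2 ⊢
        simp [h1, h2]
      · have h2 : ¬ ((k : Int) < (m : Int) + 1) := by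
          push_cast at h1 ⊢
          omega
        push_cast at h1 h2 ⊢
        simp [h1, h2]

-- min telescopes: min (i+1) r = min i r + (1 if i < r else 0).
theorem pv_min_succ (i r : Int) :
    min (i + 1) r = min i r + (if i < r then 1 else 0) := by
  by_cases h : i < r <;> simp [min_def] <;> omega

-- The slicing fold over the characterised count array produces B's closed-form slices.
theorem pv_fold_slices (filenames : List String) (j : Nat) (q r : Int) (hr0 : 0 ≤ r) :
    ((List.range j).map (fun (k : Nat) => q + if (k : Int) < r then 1 else 0)).foldl
      (fun (st : List (List String) × Int) count =>
        (st.1 ++ [(PySem.List.slice filenames (some st.2) (some (st.2 + count))).map (fun record => record)],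
         st.2 + count))
      ([], 0)
    = ((List.range j).map (fun (k : Nat) =>
        PySem.List.slice filenames (some ((k : Int) * q + min (k : Int) r))
          (some (((k : Int) + 1) * q + min ((k : Int) + 1) r))),
       (j : Int) * q + min (j : Int) r) := by
  induction j with
  | zero =>
    simp only [List.range_zero, List.map_nil, List.foldl_nil, Nat.cast_zero, zero_mul, zero_add]
    have : min (0 : Int) r = 0 := by omega
    simp [this]
  | succ j ih =>
    rw [List.range_succ, List.map_append, List.foldl_append, ih]
    simp only [List.map_append, List.map_cons, List.map_nil, List.foldl_cons, List.foldl_nil]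
    rw [Prod.mk.injEq]
    refine ⟨?_, ?_⟩
    · rw [List.append_cancel_left_eq]
      have hend : (j : Int) * q + min (j : Int) r + (q + if (j : Int) < r then 1 else 0)
          = ((j : Int) + 1) * q + min ((j : Int) + 1) r := by
        rw [pv_min_succ]; ring
      rw [hend]
      simp
    · push_cast
      rw [pv_min_succ]; ring

-- Core equality with the shared records_count generalised to a free rc.
theorem pv_main (filenames : List String) (jobs rc : Int) (hpre : jobs ≠ 0) :
    (((PySem.List.pyRange 0 (PySem.Int.mod rc jobs)).foldl pvIncAt
        (List.replicate jobs.toNat (PySem.Int.floordiv rc jobs))).foldl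
      (fun (st : List (List String) × Int) count =>
        (st.1 ++ [(PySem.List.slice filenames (some st.2) (some (st.2 + count))).map (fun record => record)],
         st.2 + count))
      ([], 0)).1
    = (PySem.List.pyRange 0 jobs).map (fun i =>
        PySem.List.slice filenames
          (some (i * PySem.Int.floordiv rc jobs + min i (PySem.Int.mod rc jobs)))
          (some ((i + 1) * PySem.Int.floordiv rc jobs + min (i + 1) (PySem.Int.mod rc jobs)))) := by
  rcases lt_or_gt_of_ne hpre with hneg | hpos
  · -- jobs < 0: both sides are []
    have h1 : jobs.toNat = 0 := by omega
    have h2 : PySem.Int.mod rc jobs ≤ 0 := (PySem.Int.mod_neg_bounds rc hneg).2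
    have h3 : PySem.List.pyRange 0 (PySem.Int.mod rc jobs) = [] := by
      simp [PySem.List.pyRange]; omega
    have h4 : PySem.List.pyRange 0 jobs = [] := by
      simp [PySem.List.pyRange]; omega
    simp [h1, h3, h4]
  · -- jobs > 0
    have hr0 : 0 ≤ PySem.Int.mod rc jobs := PySem.Int.mod_nonneg rc hpos
    have hm : (PySem.Int.mod rc jobs).toNat ≤ jobs.toNat := by
      have := PySem.Int.mod_lt rc hpos
      omega
    have hrn : PySem.Int.mod rc jobs = ((PySem.Int.mod rc jobs).toNat : Int) := by omega
    rw [hrn, PySem.List.pyRange_zero_natCast,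
        pv_perJob_eq jobs.toNat (PySem.Int.mod rc jobs).toNat _ hm,
        ← hrn, pv_fold_slices _ _ _ _ hr0]
    have hjn : jobs = (jobs.toNat : Int) := by omega
    rw [hjn, PySem.List.pyRange_zero_natCast, List.map_map]
    apply List.map_congr_left
    intro k _
    simp [Function.comp]

-- ===== VERDICT (by name: the statement is the Claim_ definition above) =====
theorem create_records_lists_spec : Claim_equal_create_records_lists := by
  intro filenames jobs load _ hpre
  unfold Spec_create_records_lists create_records_lists create_records_lists_alt
  dsimp only
  exact pv_main filenames jobs _ hpre
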